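-- pv_equiv track=rewrite | github.com/noahostle/SPEAR | Attacks/full_key_recovery/ladder/ladder.py | sampled_diff_score_from_values
-- ===== SOURCE A (Python) =====
-- from typing import Dict, List, Optional, Sequence, Tuple
--
-- def sampled_diff_score_from_values(values: Dict[int, int], diffs: Sequence[int], sample_x: Sequence[int]) -> int:
--     total = 0
--     for diff in diffs:
--         counts: Dict[int, int] = {}
--         for x in sample_x:
--             out_diff = (int(values[(int(x) + int(diff)) & 0xFFFF]) - int(values[int(x) & 0xFFFF])) & 0xFFFF
--             counts[out_diff] = counts.get(out_diff, 0) + 1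
--         total += max(counts.values())
--     return total
-- ===== SOURCE B (Python) =====
-- def sampled_diff_score_from_values(values, diffs, sample_x):
--     total = 0
--     for diff in diffs:
--         outs = sorted(
--             (int(values[(int(x) + int(diff)) & 0xFFFF]) - int(values[int(x) & 0xFFFF])) & 0xFFFF
--             for x in sample_x
--         )
--         run_lengths = []
--         run = 0
--         prev = None
--         for v in outs:
--             if run and v == prev:
--                 run += 1
--             else:
--                 if run:
--                     run_lengths.append(run)
--                 run = 1
--                 prev = v
--         if run:
--             run_lengths.append(run)
--         total += max(run_lengths)
--     return total
-- ===== Notes on version B (the rewrite author's own statement) =====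
-- stated objective: alternative
-- what changed: Per diff, B computes the mode frequency by sorting the out_diff list and taking the maximum run length of equal consecutive values, instead of A's dict-based counting with max over the counter's values.
import Mathlib
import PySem

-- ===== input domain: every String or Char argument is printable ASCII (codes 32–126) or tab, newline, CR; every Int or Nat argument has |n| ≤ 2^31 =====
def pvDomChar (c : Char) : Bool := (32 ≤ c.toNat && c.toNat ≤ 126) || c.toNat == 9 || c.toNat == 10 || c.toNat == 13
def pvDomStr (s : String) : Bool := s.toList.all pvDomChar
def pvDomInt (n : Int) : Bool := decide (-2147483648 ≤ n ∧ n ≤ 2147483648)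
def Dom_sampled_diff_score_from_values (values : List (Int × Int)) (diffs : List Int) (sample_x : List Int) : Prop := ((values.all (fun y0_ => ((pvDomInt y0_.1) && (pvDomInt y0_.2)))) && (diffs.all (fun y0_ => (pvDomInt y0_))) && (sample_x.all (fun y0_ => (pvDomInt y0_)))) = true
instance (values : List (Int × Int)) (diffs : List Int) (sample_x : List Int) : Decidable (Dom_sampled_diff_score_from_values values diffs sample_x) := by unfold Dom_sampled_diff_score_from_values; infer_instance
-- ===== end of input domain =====

-- B replaces A's per-diff dict counting (max of counter values) by sort + maximal-run-length scan; same results, alternative algorithm.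

-- ===== PORT A =====
-- shared dict access: Python's values[k] (first match in the association list); a missing key (KeyError) is excluded by Pre_
def pvGetKey (values : List (Int × Int)) (k : Int) : Int := (values.lookup k).getD 0
-- the out_diff expression both Pythons compute verbatim: (values[(x+diff)&0xFFFF] - values[x&0xFFFF]) & 0xFFFF
def pvOutDiff (values : List (Int × Int)) (diff : Int) (x : Int) : Int :=
  PySem.Int.band (pvGetKey values (PySem.Int.band (x + diff) 65535) - pvGetKey values (PySem.Int.band x 65535)) 65535

def sampled_diff_score_from_values (values : List (Int × Int)) (diffs : List Int) (sample_x : List Int) : Int :=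
  diffs.foldl (fun total diff =>
    let counts : PySem.Dict Int Int :=
      sample_x.foldl (fun c x =>
        let od := pvOutDiff values diff x
        c.insert od (c.getD od 0 + 1)) PySem.Dict.empty
    -- max(counts.values()); empty counts (Python ValueError) is excluded by Pre_
    total + ((PySem.List.max? counts.values (fun v => v)).getD 0)) 0

-- ===== PORT B =====
-- one step of B's run-length loop over the sorted out_diff list; state = (run_lengths, run, prev)
def pvRunStep (st : List Int × Int × Option Int) (v : Int) : List Int × Int × Option Int :=
  if st.2.1 ≠ 0 ∧ st.2.2 = some v then (st.1, st.2.1 + 1, st.2.2)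
  else ((if st.2.1 ≠ 0 then st.1 ++ [st.2.1] else st.1), 1, some v)

def sampled_diff_score_from_values_alt (values : List (Int × Int)) (diffs : List Int) (sample_x : List Int) : Int :=
  diffs.foldl (fun total diff =>
    let outs := PySem.List.sorted (sample_x.map (fun x => pvOutDiff values diff x)) (fun v => v)
    let st := outs.foldl pvRunStep ([], 0, none)
    let run_lengths := if st.2.1 ≠ 0 then st.1 ++ [st.2.1] else st.1
    -- max(run_lengths); empty list (Python ValueError) is excluded by Pre_
    total + ((PySem.List.max? run_lengths (fun v => v)).getD 0)) 0

-- ===== PRECONDITION & SPEC =====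
-- Pre_ = exactly the inputs where Python A returns: every looked-up key is present (else KeyError),
-- and sample_x is nonempty whenever diffs is (else max() of an empty collection raises ValueError).
def Pre_sampled_diff_score_from_values (values : List (Int × Int)) (diffs : List Int) (sample_x : List Int) : Prop :=
  (diffs ≠ [] → sample_x ≠ []) ∧
  ∀ diff ∈ diffs, ∀ x ∈ sample_x,
    (values.lookup (PySem.Int.band (x + diff) 65535)).isSome = true ∧
    (values.lookup (PySem.Int.band x 65535)).isSome = true
instance (values : List (Int × Int)) (diffs : List Int) (sample_x : List Int) : Decidable (Pre_sampled_diff_score_from_values values diffs sample_x) := by unfold Pre_sampled_diff_score_from_values; infer_instance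

def pvWitness_sampled_diff_score_from_values : (List (Int × Int)) × List Int × List Int := ([(0, 5), (1, 7)], [1], [0])

def Spec_sampled_diff_score_from_values (values : List (Int × Int)) (diffs : List Int) (sample_x : List Int) (out : Int) : Prop := out = sampled_diff_score_from_values_alt values diffs sample_x
instance (values : List (Int × Int)) (diffs : List Int) (sample_x : List Int) (out : Int) : Decidable (Spec_sampled_diff_score_from_values values diffs sample_x out) := by unfold Spec_sampled_diff_score_from_values; infer_instance

-- ===== CLAIM (what is proved, stated in full; the proofs are below) =====
def Claim_equal_sampled_diff_score_from_values : Prop := ∀ (values : List (Int × Int)) (diffs : List Int) (sample_x : List Int), Dom_sampled_diff_score_from_values values diffs sample_x → Pre_sampled_diff_score_from_values values diffs sample_x → Spec_sampled_diff_score_from_values values diffs sample_x (sampled_diff_score_from_values values diffs sample_x)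

-- ===== LEMMAS AND PROOFS =====

-- specification-side view of B's run-length loop: run lengths of the maximal runs of equal values
def pvRuns : Int → Int → List Int → List Int
  | _, k, [] => [k]
  | a, k, b :: t => if b = a then pvRuns a (k + 1) t else k :: pvRuns b 1 t

lemma pvFold_runStep (t : List Int) : ∀ (rl : List Int) (a k : Int), 0 < k →
    (let st := t.foldl pvRunStep (rl, k, some a)
     if st.2.1 ≠ 0 then st.1 ++ [st.2.1] else st.1) = rl ++ pvRuns a k t := by
  induction t with
  | nil =>
      intro rl a k hk
      have hk' : k ≠ 0 := by omega
      simp [pvRuns, hk']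
  | cons b t ih =>
      intro rl a k hk
      have hk' : k ≠ 0 := by omega
      by_cases hba : b = a
      · subst hba
        have hstep : pvRunStep (rl, k, some b) b = (rl, k + 1, some b) := by
          simp [pvRunStep, hk']
        simp only [List.foldl_cons, hstep, pvRuns]
        simpa using ih rl b (k + 1) (by omega)
      · have hstep : pvRunStep (rl, k, some a) b = (rl ++ [k], 1, some b) := by
          simp [pvRunStep, hk', Ne.symm hba]
        simp only [List.foldl_cons, hstep, pvRuns, if_neg hba]
        simpa using ih (rl ++ [k]) b 1 (by omega)

lemma pvMapCount_cons_of_ne (c : Int) (l inner : List Int) (h : ∀ x ∈ inner, x ≠ c) :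
    inner.map (fun x => (((c :: l).count x : Nat) : Int)) = inner.map (fun x => ((l.count x : Nat) : Int)) := by
  apply List.map_congr_left
  intro x hx
  simp [Ne.symm (h x hx)]

lemma pvDedup_cons (b : Int) (t : List Int) :
    PySem.List.dedup (b :: t) = b :: (PySem.List.dedup t).filter (fun x => !(x == b)) := by
  simp [PySem.List.dedup_eq_ofList, PySem.Set.ofList_cons, PySem.Set.discard]

lemma pvRuns_sorted (t : List Int) : ∀ (a k : Int), (a :: t).Pairwise (· ≤ ·) →
    pvRuns a k t =
      (k + (t.count a : Int)) ::
        ((PySem.List.dedup t).filter (fun x => !(x == a))).map (fun x => ((t.count x : Nat) : Int)) := by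
  induction t with
  | nil => intro a k _; simp [pvRuns, PySem.List.dedup, PySem.Set.ofList]
  | cons b t ih =>
      intro a k hs
      have hs' : (b :: t).Pairwise (· ≤ ·) := hs.tail
      by_cases hba : b = a
      · subst hba
        rw [pvRuns, if_pos rfl, ih b (k + 1) hs', pvDedup_cons]
        have hfilter : (b :: (PySem.List.dedup t).filter (fun x => !(x == b))).filter (fun x => !(x == b))
            = (PySem.List.dedup t).filter (fun x => !(x == b)) := by
          simp [List.filter_filter]
        rw [hfilter]
        have htail := pvMapCount_cons_of_ne b t ((PySem.List.dedup t).filter (fun x => !(x == b)))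
          (by intro x hx; simpa using (List.of_mem_filter hx))
        rw [htail]
        have hhead : k + 1 + ((t.count b : Nat) : Int) = k + (((b :: t).count b : Nat) : Int) := by
          rw [List.count_cons_self]; push_cast; ring
        rw [hhead]
      · have hab : a ≤ b := (List.pairwise_cons.mp hs).1 b (by simp)
        have hnot : ∀ y ∈ b :: t, y ≠ a := by
          intro y hy
          rcases List.mem_cons.mp hy with rfl | hy'
          · exact hba
          · have hby : b ≤ y := (List.pairwise_cons.mp hs').1 y hy'
            have : a < b := lt_of_le_of_ne hab (Ne.symm hba)
            omega
        have hcnt : (b :: t).count a = 0 := List.count_eq_zero.mpr (fun h => hnot a h rfl)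
        rw [pvRuns, if_neg hba, ih b 1 hs', pvDedup_cons, hcnt]
        have hfilter : (b :: (PySem.List.dedup t).filter (fun x => !(x == b))).filter (fun x => !(x == a))
            = b :: (PySem.List.dedup t).filter (fun x => !(x == b)) := by
          apply List.filter_eq_self.mpr
          intro y hy
          have hyin : y ∈ b :: t := by
            rcases List.mem_cons.mp hy with rfl | hy'
            · exact List.mem_cons_self
            · exact List.mem_cons_of_mem b ((PySem.List.mem_dedup t y).mp (List.mem_of_mem_filter hy'))
          simpa using hnot y hyin
        rw [hfilter]
        have htail := pvMapCount_cons_of_ne b t ((PySem.List.dedup t).filter (fun x => !(x == b)))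
          (by intro x hx; simpa using (List.of_mem_filter hx))
        simp only [List.map_cons, htail, List.count_cons_self]
        push_cast
        ring_nf

lemma pvRunLengths_sorted (s : List Int) (hs : s.Pairwise (· ≤ ·)) :
    (let st := s.foldl pvRunStep ([], 0, none)
     if st.2.1 ≠ 0 then st.1 ++ [st.2.1] else st.1) =
      (PySem.List.dedup s).map (fun x => ((s.count x : Nat) : Int)) := by
  cases s with
  | nil => simp [PySem.List.dedup, PySem.Set.ofList]
  | cons a t =>
      have hstep : pvRunStep (([], 0, none) : List Int × Int × Option Int) a = ([], 1, some a) := by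
        simp [pvRunStep]
      simp only [List.foldl_cons, hstep]
      have hfold := pvFold_runStep t [] a 1 (by omega)
      simp only [List.nil_append] at hfold
      simp only [hfold]
      rw [pvRuns_sorted t a 1 hs, pvDedup_cons]
      have htail := pvMapCount_cons_of_ne a t ((PySem.List.dedup t).filter (fun x => !(x == a)))
        (by intro x hx; simpa using (List.of_mem_filter hx))
      simp only [List.map_cons, htail, List.count_cons_self]
      push_cast
      ring_nf

lemma pvCounter_values (l : List Int) :
    (PySem.Dict.counter l).values = (PySem.List.dedup l).map (fun x => ((l.count x : Nat) : Int)) := by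
  simp [PySem.Dict.values, PySem.Dict.items_counter, List.map_map, PySem.List.dedup_eq_ofList,
    Function.comp, List.count]

lemma pvMaxD_eq_of_perm (l₁ l₂ : List Int) (h : l₁.Perm l₂) :
    (PySem.List.max? l₁ (fun v => v)).getD 0 = (PySem.List.max? l₂ (fun v => v)).getD 0 := by
  cases h1 : PySem.List.max? l₁ (fun v => v) with
  | none =>
      have he : l₁ = [] := (PySem.List.max?_eq_none_iff l₁ (fun v => v)).mp h1
      subst he
      have : l₂ = [] := h.symm.eq_nil
      subst this
      rfl
  | some m₁ =>
      cases h2 : PySem.List.max? l₂ (fun v => v) with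
      | none =>
          have he : l₂ = [] := (PySem.List.max?_eq_none_iff l₂ (fun v => v)).mp h2
          subst he
          have : l₁ = [] := h.eq_nil
          subst this
          simp [PySem.List.max?] at h1
      | some m₂ =>
          have hm1 : m₁ ∈ l₂ := h.mem_iff.mp (PySem.List.max?_mem h1)
          have hm2 : m₂ ∈ l₁ := h.mem_iff.mpr (PySem.List.max?_mem h2)
          have h12 : m₁ ≤ m₂ := PySem.List.max?_isMax h2 m₁ hm1
          have h21 : m₂ ≤ m₁ := PySem.List.max?_isMax h1 m₂ hm2
          simp [le_antisymm h12 h21]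

lemma pvDedup_perm_of_perm (l₁ l₂ : List Int) (h : l₁.Perm l₂) :
    (PySem.List.dedup l₁).Perm (PySem.List.dedup l₂) := by
  rw [List.perm_ext_iff_of_nodup (PySem.List.nodup_dedup l₁) (PySem.List.nodup_dedup l₂)]
  intro a
  rw [PySem.List.mem_dedup, PySem.List.mem_dedup]
  exact ⟨fun hm => h.mem_iff.mp hm, fun hm => h.mem_iff.mpr hm⟩

lemma pvPerDiff (values : List (Int × Int)) (diff : Int) (sample_x : List Int) :
    ((PySem.List.max? (sample_x.foldl (fun c x =>
        let od := pvOutDiff values diff x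
        c.insert od (c.getD od 0 + 1)) PySem.Dict.empty).values (fun v => v)).getD 0) =
    ((PySem.List.max? (let st := (PySem.List.sorted (sample_x.map (fun x => pvOutDiff values diff x)) (fun v => v)).foldl pvRunStep ([], 0, none)
        if st.2.1 ≠ 0 then st.1 ++ [st.2.1] else st.1) (fun v => v)).getD 0) := by
  have hA : sample_x.foldl (fun c x =>
        let od := pvOutDiff values diff x
        c.insert od (c.getD od 0 + 1)) PySem.Dict.empty
      = PySem.Dict.counter (sample_x.map (fun x => pvOutDiff values diff x)) := by
    rw [← PySem.Dict.foldl_insert_getD_add_one_eq_counter, List.foldl_map]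
  rw [hA, pvCounter_values]
  have hpair : (PySem.List.sorted (sample_x.map (fun x => pvOutDiff values diff x)) (fun v => v)).Pairwise (· ≤ ·) :=
    PySem.List.sorted_pairwise (sample_x.map (fun x => pvOutDiff values diff x)) (fun v => v)
  rw [pvRunLengths_sorted _ hpair]
  have hperm : (PySem.List.sorted (sample_x.map (fun x => pvOutDiff values diff x)) (fun v => v)).Perm
      (sample_x.map (fun x => pvOutDiff values diff x)) :=
    PySem.List.sorted_perm _ _ _
  have hfun : (fun x => (((PySem.List.sorted (sample_x.map (fun x => pvOutDiff values diff x)) (fun v => v)).count x : Nat) : Int))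
      = fun x => (((sample_x.map (fun x => pvOutDiff values diff x)).count x : Nat) : Int) := by
    funext x
    rw [List.Perm.count_eq hperm]
  rw [hfun]
  exact pvMaxD_eq_of_perm _ _
    ((pvDedup_perm_of_perm _ _ hperm.symm).map _)

-- ===== VERDICT (by name: the statement is the Claim_ definition above) =====
theorem sampled_diff_score_from_values_spec : Claim_equal_sampled_diff_score_from_values := by
  intro values diffs sample_x _ _
  unfold Spec_sampled_diff_score_from_values
  unfold sampled_diff_score_from_values sampled_diff_score_from_values_alt
  congr 1
  funext total diff
  simp only []
  rw [pvPerDiff values diff sample_x]
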